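-- pv_equiv track=rewrite | github.com/ClarkSims/BrainTeasers | tricks/valentines/valentines.py | Valentines
-- ===== SOURCE A (Python) =====
-- from typing import List, Tuple
--
-- def Valentines(hr_record: List[str]) -> List[Tuple]:
--     dag = {}
--     in_degree = {}
--     for rec in hr_record:
--         sup = rec[:6]
--         emp = rec[6:]
--         in_degree[emp] = 0
--         in_degree[sup] = 0
--
--     for rec in hr_record:
--         sup = rec[:6]
--         emp = rec[6:]
--         if emp in dag:
--             dag[emp].append(sup)
--         else:
--             dag[emp] = [sup]
--         in_degree[sup] += 1
--
--     lowest = set()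
--     num_valentine = {}
--     for empid, degree in in_degree.items():
--         if degree == 0:
--             lowest.add(empid)
--         else:
--             num_valentine[empid] = 0
--
--     while len(lowest) > 0:
--         next_lowest = set()
--         for empid in lowest:
--             # give valentines from subordinates to first supervisor
--             if empid in num_valentine and empid in dag:
--                 supid = dag[empid][0]
--                 num_valentine[supid] += num_valentine[empid]
--             # write one valentine to each supervisor
--             if empid in dag:
--                 for supid in dag[empid]:
--                     num_valentine[supid] += 1
--                     in_degree[supid] -= 1
--                     if in_degree[supid] == 0:
--                         next_lowest.add(supid)
--         lowest = next_lowest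
--
--     ret_list = [(name, count) for name, count in num_valentine.items()]
--
--     def key_rev_count(name_count):
--         return -name_count[1]
--
--     sorted_ret_list = sorted(ret_list, key=key_rev_count)
--     return sorted_ret_list
-- ===== SOURCE B (Python) =====
-- def Valentines(hr_record):
--     pairs = [(rec[6:], rec[:6]) for rec in hr_record]
--     deg = {}
--     for emp, sup in pairs:
--         deg.setdefault(emp, 0)
--         deg[sup] = deg.get(sup, 0) + 1
--     val = {n: 0 for n, d in deg.items() if d > 0}
--     done = set()
--     while True:
--         zeros = [n for n in deg if deg[n] == 0 and n not in done]
--         if not zeros: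
--             return sorted(val.items(), key=lambda kv: -kv[1])
--         done.update(zeros)
--         for n in zeros:
--             first = True
--             for emp, sup in pairs:
--                 if emp == n:
--                     if first and n in val:
--                         val[sup] += val[n]
--                     first = False
--                     val[sup] += 1
--                     deg[sup] -= 1
-- ===== Notes on version B (the rewrite author's own statement) =====
-- stated objective: simpler
-- what changed: A's Kahn-style propagation with an adjacency dict (dag) and explicit frontier sets (lowest/next_lowest) is replaced by a repeated-scan fixpoint: each round rescans the degree dict for not-yet-processed zero-degree nodes and rescans the record list to push their valentines upward, so the adjacency index and frontier bookkeeping disappear.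
import Mathlib
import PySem

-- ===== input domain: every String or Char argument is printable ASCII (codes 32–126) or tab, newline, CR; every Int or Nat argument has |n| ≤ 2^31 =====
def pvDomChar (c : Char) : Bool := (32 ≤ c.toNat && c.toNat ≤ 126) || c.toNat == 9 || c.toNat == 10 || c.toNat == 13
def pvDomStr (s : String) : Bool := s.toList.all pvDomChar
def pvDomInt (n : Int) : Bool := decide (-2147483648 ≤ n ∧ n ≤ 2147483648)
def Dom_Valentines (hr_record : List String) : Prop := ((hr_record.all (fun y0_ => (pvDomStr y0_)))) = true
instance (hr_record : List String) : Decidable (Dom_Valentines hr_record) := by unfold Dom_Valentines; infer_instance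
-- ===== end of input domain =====

-- B replaces A's Kahn propagation (adjacency dict + frontier sets) by a repeated-scan
-- fixpoint (re-scan for zero-degree nodes, re-scan the records to push counts up);
-- objective: simpler — no adjacency index, no frontier bookkeeping; not faster.

-- ===== PORT A =====
def ValentinesStep (dag : PySem.Dict String (List String))
    (s : PySem.Dict String Int × PySem.Dict String Int × PySem.Set String) (empid : String) :
    PySem.Dict String Int × PySem.Dict String Int × PySem.Set String :=
  let (in_degree, num_valentine, next_lowest) := s
  let num_valentine :=
    if num_valentine.contains empid && dag.contains empid then
      let supid := PySem.List.pyGetD (dag.getD empid []) 0 ""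
      num_valentine.modify supid 0 (· + num_valentine.getD empid 0)
    else num_valentine
  if dag.contains empid then
    (dag.getD empid []).foldl (fun t supid =>
      let (in_degree, num_valentine, next_lowest) := t
      let num_valentine := num_valentine.modify supid 0 (· + 1)
      let in_degree := in_degree.modify supid 0 (· - 1)
      let next_lowest := if in_degree.getD supid 0 == 0 then PySem.Set.add next_lowest supid else next_lowest
      (in_degree, num_valentine, next_lowest)) (in_degree, num_valentine, next_lowest)
  else (in_degree, num_valentine, next_lowest)

def ValentinesLoop (dag : PySem.Dict String (List String)) :
    Nat → PySem.Dict String Int → PySem.Dict String Int → PySem.Set String → PySem.Dict String Int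
  | 0, _, num_valentine, _ => num_valentine
  | fuel+1, in_degree, num_valentine, lowest =>
    if PySem.Set.len lowest > 0 then
      let r := lowest.foldl (ValentinesStep dag) (in_degree, num_valentine, PySem.Set.empty)
      ValentinesLoop dag fuel r.1 r.2.1 r.2.2
    else num_valentine

def Valentines (hr_record : List String) : List (String × Int) :=
  let in_degree : PySem.Dict String Int :=
    hr_record.foldl (fun d rec =>
      let sup := PySem.Str.slice rec none (some 6)
      let emp := PySem.Str.slice rec (some 6) none
      (d.insert emp 0).insert sup 0) PySem.Dict.empty
  let s := hr_record.foldl (fun (s : PySem.Dict String (List String) × PySem.Dict String Int) rec =>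
      let sup := PySem.Str.slice rec none (some 6)
      let emp := PySem.Str.slice rec (some 6) none
      ((if s.1.contains emp then s.1.insert emp (s.1.getD emp [] ++ [sup]) else s.1.insert emp [sup]),
       s.2.modify sup 0 (· + 1))) (PySem.Dict.empty, in_degree)
  let dag := s.1
  let in_degree := s.2
  let t := in_degree.items.foldl
      (fun (t : PySem.Set String × PySem.Dict String Int) kv =>
        if kv.2 == 0 then (PySem.Set.add t.1 kv.1, t.2) else (t.1, t.2.insert kv.1 0))
      (PySem.Set.empty, PySem.Dict.empty)
  let num_valentine := ValentinesLoop dag (2 * hr_record.length + 2) in_degree t.2 t.1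
  PySem.List.sorted num_valentine.items (fun p => -p.2) false


-- ===== PORT B =====
def ValentinesAltInner (pairs : List (String × String)) (n : String)
    (s : PySem.Dict String Int × PySem.Dict String Int) :
    PySem.Dict String Int × PySem.Dict String Int :=
  let r := pairs.foldl (fun (t : PySem.Dict String Int × PySem.Dict String Int × Bool) p =>
      if p.1 == n then
        let (deg, val, first) := t
        let val := if first && val.contains n then val.modify p.2 0 (· + val.getD n 0) else val
        let val := val.modify p.2 0 (· + 1)
        let deg := deg.modify p.2 0 (· - 1)
        (deg, val, false)
      else t) (s.1, s.2, true)
  (r.1, r.2.1)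

def ValentinesAltLoop (pairs : List (String × String)) :
    Nat → PySem.Dict String Int → PySem.Dict String Int → PySem.Set String → PySem.Dict String Int
  | 0, _, val, _ => val
  | fuel+1, deg, val, done =>
    let zeros := deg.keys.filter (fun n => deg.getD n 0 == 0 && !(PySem.Set.contains done n))
    if zeros.isEmpty then val
    else
      let done := PySem.Set.update done zeros
      let r := zeros.foldl (fun s n => ValentinesAltInner pairs n s) (deg, val)
      ValentinesAltLoop pairs fuel r.1 r.2 done

def Valentines_alt (hr_record : List String) : List (String × Int) :=
  let pairs := hr_record.map (fun rec =>
      (PySem.Str.slice rec (some 6) none, PySem.Str.slice rec none (some 6)))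
  let deg := pairs.foldl (fun (d : PySem.Dict String Int) p =>
      let d := d.setdefault p.1 0
      d.insert p.2 (d.getD p.2 0 + 1)) PySem.Dict.empty
  let val := deg.items.foldl (fun (v : PySem.Dict String Int) kv =>
      if kv.2 > 0 then v.insert kv.1 0 else v) PySem.Dict.empty
  let val := ValentinesAltLoop pairs (2 * hr_record.length + 2) deg val PySem.Set.empty
  PySem.List.sorted val.items (fun p => -p.2) false


-- ===== PRECONDITION & SPEC =====
def Spec_Valentines (hr_record : List String) (out : List (String × Int)) : Prop := out = Valentines_alt hr_record
instance (hr_record : List String) (out : List (String × Int)) : Decidable (Spec_Valentines hr_record out) := by unfold Spec_Valentines; infer_instance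

-- ===== CLAIM (what is proved, stated in full; the proofs are below) =====
def Claim_equal_Valentines : Prop := ∀ (hr_record : List String), Dom_Valentines hr_record → Spec_Valentines hr_record (Valentines hr_record)

-- ===== LEMMAS AND PROOFS =====
def pvPairs (hr_record : List String) : List (String × String) :=
  hr_record.map (fun rec => (PySem.Str.slice rec (some 6) none, PySem.Str.slice rec none (some 6)))
def pvSups (P : List (String × String)) (e : String) : List String :=
  (P.filter (fun p => p.1 == e)).map Prod.snd
def pvFs (P : List (String × String)) (e : String) : String :=
  PySem.List.pyGetD (pvSups P e) 0 ""
def pvKD (P : List (String × String)) : List String :=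
  PySem.List.dedup (P.flatMap (fun p => [p.1, p.2]))
def pvKV (P : List (String × String)) : List String :=
  (pvKD P).filter (fun n => decide (n ∈ P.map Prod.snd))
def pvDegA0 (P : List (String × String)) : PySem.Dict String Int :=
  P.foldl (fun d p => (d.insert p.1 0).insert p.2 0) PySem.Dict.empty
def pvDagA (P : List (String × String)) : PySem.Dict String (List String) :=
  P.foldl (fun d p => if d.contains p.1 then d.insert p.1 (d.getD p.1 [] ++ [p.2])
                      else d.insert p.1 [p.2]) PySem.Dict.empty
def pvDegA (P : List (String × String)) : PySem.Dict String Int :=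
  P.foldl (fun d p => d.modify p.2 0 (· + 1)) (pvDegA0 P)
def pvDegB (P : List (String × String)) : PySem.Dict String Int :=
  P.foldl (fun (d : PySem.Dict String Int) p =>
      let d := d.setdefault p.1 0
      d.insert p.2 (d.getD p.2 0 + 1)) PySem.Dict.empty
def pvT (P : List (String × String)) (L : List String) (n : String) : Int :=
  (L.map (fun e => (((pvSups P e).count n : Nat) : Int))).sum
def pvTrans (P : List (String × String)) (nv : PySem.Dict String Int) (e n : String) : Int :=
  if ((nv.contains e && !(pvSups P e).isEmpty) = true ∧ pvFs P e = n) then nv.getD e 0 else 0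
def pvS (P : List (String × String)) (nv : PySem.Dict String Int) (L : List String) (n : String) : Int :=
  (L.map (fun e => pvTrans P nv e n)).sum
def pvDegNow (P : List (String × String)) (done : PySem.Set String) (n : String) : Int :=
  (P.countP (fun p => p.2 == n && !(PySem.Set.contains done p.1)) : Int)

-- ===== generic set/dict helpers =====
lemma keys_insert_eq_add {ν : Type} (d : PySem.Dict String ν) (k : String) (v : ν) :
    (d.insert k v).keys = PySem.Set.add d.keys k := by
  show _ = if PySem.Set.contains d.keys k then d.keys else d.keys ++ [k]
  by_cases h : d.contains k = true
  · rw [PySem.Dict.keys_insert_of_contains d v h, if_pos]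
    exact (PySem.Set.contains_iff _ _).mpr ((PySem.Dict.contains_iff_mem_keys d k).mp h)
  · rw [PySem.Dict.keys_insert_of_not_contains d v (by simpa using h), if_neg]
    simp only [PySem.Set.contains_iff]
    exact fun hmem => h ((PySem.Dict.contains_iff_mem_keys d k).mpr hmem)

lemma keys_setdefault_eq_add {ν : Type} (d : PySem.Dict String ν) (k : String) (v : ν) :
    (d.setdefault k v).keys = PySem.Set.add d.keys k := by
  show _ = if PySem.Set.contains d.keys k then d.keys else d.keys ++ [k]
  rw [PySem.Dict.keys_setdefault]
  by_cases h : d.contains k = true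
  · rw [if_pos h, if_pos]
    exact (PySem.Set.contains_iff _ _).mpr ((PySem.Dict.contains_iff_mem_keys d k).mp h)
  · rw [if_neg h, if_neg]
    simp only [PySem.Set.contains_iff]
    exact fun hmem => h ((PySem.Dict.contains_iff_mem_keys d k).mpr hmem)

lemma set_update_of_subset (s : PySem.Set String) (xs : List String) (h : ∀ x ∈ xs, x ∈ s) :
    PySem.Set.update s xs = s := by
  rw [PySem.Set.update_eq_append_filter]
  have hnil : (PySem.Set.ofList xs).filter (fun y => !s.contains y) = [] := by
    rw [List.filter_eq_nil_iff]
    intro a ha hf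
    have hc := (PySem.Set.contains_iff s a).mpr (h a ((PySem.Set.mem_ofList xs a).mp ha))
    rw [hc] at hf
    exact Bool.noConfusion hf
  rw [hnil, List.append_nil]

lemma getD_setdefault_zero (d : PySem.Dict String Int) (k n : String) :
    (d.setdefault k 0).getD n 0 = d.getD n 0 := by
  by_cases h : n = k
  · subst h; exact PySem.Dict.getD_setdefault_self d n 0 0
  · rw [PySem.Dict.getD_eq_get?_getD, PySem.Dict.get?_setdefault_of_ne d 0 h,
        ← PySem.Dict.getD_eq_get?_getD]

-- ===== build-phase characterizations =====
lemma pvDegA0_keys (P : List (String × String)) (d : PySem.Dict String Int) :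
    (P.foldl (fun d p => (d.insert p.1 0).insert p.2 0) d).keys
      = PySem.Set.update d.keys (P.flatMap (fun p => [p.1, p.2])) := by
  induction P generalizing d with
  | nil => rfl
  | cons p P ih =>
    simp only [List.foldl_cons, List.flatMap_cons, ih, keys_insert_eq_add]
    rfl

lemma pvDegA0_getD (P : List (String × String)) (d : PySem.Dict String Int)
    (hd : ∀ n, d.getD n 0 = 0) :
    ∀ n, (P.foldl (fun d p => (d.insert p.1 0).insert p.2 0) d).getD n 0 = 0 := by
  induction P generalizing d with
  | nil => exact hd
  | cons p P ih =>
    refine ih _ (fun n => ?_)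
    rw [PySem.Dict.getD_insert, PySem.Dict.getD_insert]
    split <;> [rfl; skip]
    split <;> [rfl; exact hd n]

lemma degA_fold_snd (P : List (String × String)) (d : PySem.Dict String Int) :
    P.foldl (fun d p => d.modify p.2 0 (· + 1)) d
      = (P.map Prod.snd).foldl (fun d x => d.modify x 0 (· + 1)) d := by
  induction P generalizing d with
  | nil => rfl
  | cons p P ih => simp only [List.foldl_cons, List.map_cons, ih]

lemma pvDegA_keys (P : List (String × String)) : (pvDegA P).keys = pvKD P := by
  unfold pvDegA
  rw [degA_fold_snd]
  have h2 := PySem.Dict.keys_foldl_modify_key (P.map Prod.snd) id 0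
      (fun _ _ => (· + 1)) (pvDegA0 P)
  simp only [List.map_id] at h2
  rw [show (fun (d : PySem.Dict String Int) (x : String) => d.modify x 0 (· + 1))
        = (fun d x => d.modify (id x) 0 ((fun _ _ => (· + 1)) d x)) from rfl, h2]
  unfold pvDegA0
  rw [show (PySem.Dict.empty : PySem.Dict String Int) = PySem.Dict.mk [] from rfl] at *
  rw [pvDegA0_keys]
  have hk : (PySem.Dict.mk [] : PySem.Dict String Int).keys = [] := rfl
  rw [hk]
  have : PySem.Set.update ([] : PySem.Set String) (P.flatMap (fun p => [p.1, p.2]))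
      = PySem.Set.ofList (P.flatMap (fun p => [p.1, p.2])) := rfl
  rw [this, ← PySem.List.dedup_eq_ofList]
  apply set_update_of_subset
  intro x hx
  rw [PySem.List.dedup_eq_ofList, PySem.Set.mem_ofList]
  rcases List.mem_map.mp hx with ⟨p, hp, rfl⟩
  exact List.mem_flatMap.mpr ⟨p, hp, by simp⟩

lemma pvDegA_getD (P : List (String × String)) (n : String) :
    (pvDegA P).getD n 0 = ((P.map Prod.snd).count n : Int) := by
  unfold pvDegA
  rw [degA_fold_snd]
  rw [show (fun (d : PySem.Dict String Int) (x : String) => d.modify x 0 (· + 1))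
      = (fun (d : PySem.Dict String Int) (x : String) => d.modify x 0 (fun y => y + 1)) from rfl]
  rw [PySem.Dict.getD_foldl_modify_add_one]
  have h0 : (pvDegA0 P).getD n 0 = 0 :=
    pvDegA0_getD P PySem.Dict.empty (fun n => PySem.Dict.getD_empty n 0) n
  rw [h0]
  simp

-- ===== B build characterization =====
lemma pvDegB_char (P : List (String × String)) (d : PySem.Dict String Int) :
    ((P.foldl (fun (d : PySem.Dict String Int) p =>
        let d := d.setdefault p.1 0
        d.insert p.2 (d.getD p.2 0 + 1)) d).keys
      = PySem.Set.update d.keys (P.flatMap (fun p => [p.1, p.2]))) ∧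
    (∀ n, (P.foldl (fun (d : PySem.Dict String Int) p =>
        let d := d.setdefault p.1 0
        d.insert p.2 (d.getD p.2 0 + 1)) d).getD n 0
      = d.getD n 0 + ((P.map Prod.snd).count n : Int)) := by
  induction P generalizing d with
  | nil => exact ⟨rfl, by simp⟩
  | cons p P ih =>
    simp only [List.foldl_cons, List.flatMap_cons, List.map_cons]
    refine ⟨?_, ?_⟩
    · rw [(ih _).1, keys_insert_eq_add, keys_setdefault_eq_add]
      rfl
    · intro n
      rw [(ih _).2 n, PySem.Dict.getD_insert]
      by_cases h : n = p.2
      · subst h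
        rw [if_pos rfl, getD_setdefault_zero, List.count_cons]
        simp
        ring
      · rw [if_neg h, getD_setdefault_zero, List.count_cons]
        have hbe : (p.2 == n) = false := by simpa using fun hh : p.2 = n => h hh.symm
        rw [hbe]
        simp

lemma pvDegB_keys (P : List (String × String)) : (pvDegB P).keys = pvKD P := by
  have h := (pvDegB_char P PySem.Dict.empty).1
  unfold pvDegB
  rw [h]
  have hk : (PySem.Dict.empty : PySem.Dict String Int).keys = [] := rfl
  rw [hk, pvKD, PySem.List.dedup_eq_ofList]
  rfl

lemma pvDegB_getD (P : List (String × String)) (n : String) :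
    (pvDegB P).getD n 0 = ((P.map Prod.snd).count n : Int) := by
  have h := (pvDegB_char P PySem.Dict.empty).2 n
  unfold pvDegB
  rw [h, PySem.Dict.getD_empty]
  ring

lemma pvKD_nodup (P : List (String × String)) : (pvKD P).Nodup := by
  rw [pvKD, PySem.List.dedup_eq_ofList]
  exact PySem.Set.nodup_ofList _

lemma pvDegAB (P : List (String × String)) : pvDegA P = pvDegB P := by
  apply PySem.Dict.ext
  rw [PySem.Dict.items_eq_map_keys _ (by rw [pvDegA_keys]; exact pvKD_nodup P) 0,
      PySem.Dict.items_eq_map_keys _ (by rw [pvDegB_keys]; exact pvKD_nodup P) 0,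
      pvDegA_keys, pvDegB_keys]
  apply List.map_congr_left
  intro k _
  rw [pvDegA_getD, pvDegB_getD]

-- ===== dag characterization =====
lemma pvDagA_eq_modify (P : List (String × String)) :
    pvDagA P = P.foldl (fun d p => d.modify p.1 [] (fun x => x ++ [p.2])) PySem.Dict.empty := by
  unfold pvDagA
  apply PySem.List.foldl_congr_mem
  intro d p _
  by_cases h : d.contains p.1 = true
  · rw [if_pos h]; rfl
  · rw [if_neg h]
    show d.insert p.1 [p.2] = d.insert p.1 ((d.getD p.1 []) ++ [p.2])
    rw [PySem.Dict.getD_of_not_contains d [] (by simpa using h)]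
    rfl

lemma pvDagA_getD (P : List (String × String)) (e : String) :
    (pvDagA P).getD e [] = pvSups P e := by
  rw [pvDagA_eq_modify, PySem.Dict.getD_foldl_modify_append, PySem.Dict.getD_empty]
  rfl

lemma pvDagA_contains (P : List (String × String)) (e : String) :
    ((pvDagA P).contains e = true) ↔ pvSups P e ≠ [] := by
  rw [pvDagA_eq_modify]
  have hk := PySem.Dict.keys_foldl_modify_key P Prod.fst [] (fun _ p => (fun x => x ++ [p.2])) PySem.Dict.empty
  rw [PySem.Dict.contains_iff_mem_keys, hk]
  have : PySem.Set.update (PySem.Dict.empty : PySem.Dict String (List String)).keys (P.map Prod.fst)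
      = PySem.Set.ofList (P.map Prod.fst) := rfl
  rw [this, PySem.Set.mem_ofList]
  unfold pvSups
  constructor
  · intro h
    rcases List.mem_map.mp h with ⟨p, hp, he⟩
    have hpf : p ∈ P.filter (fun q => q.1 == e) := List.mem_filter.mpr ⟨hp, by simp [he]⟩
    exact List.ne_nil_of_mem (List.mem_map_of_mem hpf)
  · intro h
    rcases List.exists_mem_of_ne_nil _ h with ⟨x, hx⟩
    rcases List.mem_map.mp hx with ⟨p, hpf, _⟩
    rcases List.mem_filter.mp hpf with ⟨hp, hbe⟩
    exact List.mem_map.mpr ⟨p, hp, by simpa using hbe⟩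

-- ===== initial lowest / num_valentine =====
def pvInitA (P : List (String × String)) : PySem.Set String × PySem.Dict String Int :=
  (pvDegA P).items.foldl
      (fun (t : PySem.Set String × PySem.Dict String Int) kv =>
        if kv.2 == 0 then (PySem.Set.add t.1 kv.1, t.2) else (t.1, t.2.insert kv.1 0))
      (PySem.Set.empty, PySem.Dict.empty)

def pvVal0 (P : List (String × String)) : PySem.Dict String Int :=
  (pvDegB P).items.foldl (fun (v : PySem.Dict String Int) kv =>
      if kv.2 > 0 then v.insert kv.1 0 else v) PySem.Dict.empty

lemma foldl_add_fresh : ∀ (l : List String) (s : PySem.Set String),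
    l.Nodup → (∀ x ∈ l, x ∉ s) → l.foldl PySem.Set.add s = s ++ l := by
  intro l
  induction l with
  | nil => intro s _ _; simp
  | cons x l ih =>
    intro s hd hdisj
    have hx : PySem.Set.add s x = s ++ [x] := by
      show (if s.contains x then s else s ++ [x]) = s ++ [x]
      rw [if_neg]
      intro hc
      exact hdisj x (by simp) ((PySem.Set.contains_iff s x).mp hc)
    rw [List.foldl_cons, hx, ih (s ++ [x]) (List.nodup_cons.mp hd).2]
    · simp
    · intro y hy hmem
      rcases List.mem_append.mp hmem with h1 | h1
      · exact hdisj y (by simp [hy]) h1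
      · rw [List.mem_singleton] at h1
        exact (List.nodup_cons.mp hd).1 (h1 ▸ hy)

lemma pvInitA_split (P : List (String × String)) :
    pvInitA P = ((pvDegA P).items.foldl
        (fun (low : PySem.Set String) kv => if kv.2 == 0 then PySem.Set.add low kv.1 else low) PySem.Set.empty,
      (pvDegA P).items.foldl
        (fun (nv : PySem.Dict String Int) kv => if kv.2 == 0 then nv else nv.insert kv.1 0) PySem.Dict.empty) := by
  unfold pvInitA
  rw [PySem.List.foldl_congr_mem _ _
      (fun (t : PySem.Set String × PySem.Dict String Int) kv =>
        ((if kv.2 == 0 then PySem.Set.add t.1 kv.1 else t.1),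
         (if kv.2 == 0 then t.2 else t.2.insert kv.1 0))) _
      (by intro acc kv _; by_cases h : (kv.2 == 0) = true <;> simp [h])]
  rw [PySem.List.foldl_prod_mk
      (f := fun (low : PySem.Set String) (kv : String × Int) => if kv.2 == 0 then PySem.Set.add low kv.1 else low)
      (g := fun (nv : PySem.Dict String Int) (kv : String × Int) => if kv.2 == 0 then nv else nv.insert kv.1 0)]

lemma pvLow0_char (P : List (String × String)) :
    (pvInitA P).1 = (pvKD P).filter (fun n => (pvDegA P).getD n 0 == 0) := by
  rw [pvInitA_split]
  show ((pvDegA P).items.foldl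
      (fun low kv => if kv.2 == 0 then PySem.Set.add low kv.1 else low) PySem.Set.empty) = _
  have he := PySem.List.foldl_if_eq_foldl_filter (fun (kv : String × Int) => kv.2 == 0)
      (fun (low : PySem.Set String) kv => PySem.Set.add low kv.1) (pvDegA P).items PySem.Set.empty
  rw [he]
  have hnd := pvKD_nodup P
  have hkeys := pvDegA_keys P
  rw [PySem.Dict.items_eq_map_keys _ (hkeys ▸ hnd) 0, hkeys]
  rw [List.filter_map, List.foldl_map]
  have hfa := foldl_add_fresh ((pvKD P).filter
      (fun k => (fun (kv : String × Int) => kv.2 == 0) ((fun k => (k, (pvDegA P).getD k 0)) k)))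
      PySem.Set.empty (List.Nodup.filter _ hnd) (by intro x _ hx; exact (List.not_mem_nil (a := x)) hx)
  simpa using hfa

lemma pvNV0_eq_pvVal0 (P : List (String × String)) : (pvInitA P).2 = pvVal0 P := by
  rw [pvInitA_split]
  dsimp only
  rw [pvDegAB]
  unfold pvVal0
  apply PySem.List.foldl_congr_mem
  intro acc kv hkv
  obtain ⟨k, v⟩ := kv
  have hnd : (pvDegB P).keys.Nodup := by rw [pvDegB_keys]; exact pvKD_nodup P
  have hv : v = ((P.map Prod.snd).count k : Int) := by
    have := PySem.Dict.getD_of_mem_items (pvDegB P) hkv hnd 0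
    rw [pvDegB_getD] at this
    exact this.symm
  by_cases h : v = 0
  · rw [if_pos (by simpa using h), if_neg (by omega)]
  · have hnn : (0:Int) ≤ v := by rw [hv]; exact Int.natCast_nonneg _
    rw [if_neg (by simpa using h), if_pos (by omega)]

lemma ofList_self (l : List String) (h : l.Nodup) : PySem.Set.ofList l = l := by
  rw [PySem.Set.ofList_eq_foldl, foldl_add_fresh l [] h (by intro x _ hx; exact (List.not_mem_nil) hx)]
  simp

def pvValFiltered (P : List (String × String)) : List (String × Int) :=
  (pvDegB P).items.filter (fun kv => decide (kv.2 > 0))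

lemma pvVal0_eq_fold_filter (P : List (String × String)) :
    pvVal0 P = (pvValFiltered P).foldl (fun (v : PySem.Dict String Int) kv => v.insert kv.1 0) PySem.Dict.empty := by
  unfold pvVal0 pvValFiltered
  exact PySem.List.foldl_ite_eq_foldl_filter (fun (kv : String × Int) => kv.2 > 0)
      (fun (v : PySem.Dict String Int) kv => v.insert kv.1 0) (pvDegB P).items PySem.Dict.empty

lemma pvValFiltered_fst (P : List (String × String)) :
    (pvValFiltered P).map Prod.fst = pvKV P := by
  unfold pvValFiltered
  have hnd : (pvDegB P).keys.Nodup := by rw [pvDegB_keys]; exact pvKD_nodup P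
  rw [PySem.Dict.items_eq_map_keys _ hnd 0, List.filter_map, pvDegB_keys, List.map_map]
  unfold pvKV
  have hfc : ∀ n ∈ pvKD P,
      ((fun (kv : String × Int) => decide (kv.2 > 0)) ∘ (fun k => (k, (pvDegB P).getD k 0))) n
        = decide (n ∈ P.map Prod.snd) := by
    intro n _
    simp only [Function.comp_apply, pvDegB_getD]
    by_cases h : n ∈ P.map Prod.snd
    · have : 0 < (P.map Prod.snd).count n := List.count_pos_iff.mpr h
      simp only [decide_eq_decide]
      exact ⟨fun _ => h, fun _ => by exact_mod_cast this⟩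
    · have : (P.map Prod.snd).count n = 0 := List.count_eq_zero.mpr h
      simp [h, this]
  rw [List.filter_congr hfc]
  simp [Function.comp_def]

lemma pvVal0_keys (P : List (String × String)) : (pvVal0 P).keys = pvKV P := by
  rw [pvVal0_eq_fold_filter]
  have hk := PySem.Dict.keys_foldl_insert_key (pvValFiltered P) Prod.fst
      (fun _ _ => (0:Int)) PySem.Dict.empty
  rw [hk, PySem.Dict.keys_empty]
  show PySem.Set.ofList _ = _
  rw [pvValFiltered_fst]
  exact ofList_self _ (List.Nodup.filter _ (pvKD_nodup P))

lemma pvKV_nodup (P : List (String × String)) : (pvKV P).Nodup :=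
  List.Nodup.filter _ (pvKD_nodup P)

-- ===== inner fold characterization (A side) =====
lemma pvInnerA_char (su : List String) :
    ∀ (deg nv : PySem.Dict String Int) (next : PySem.Set String),
    (∀ s ∈ su, s ∈ deg.keys ∧ s ∈ nv.keys) → next.Nodup →
    ((su.foldl (fun t supid =>
      let (in_degree, num_valentine, next_lowest) := t
      let num_valentine := num_valentine.modify supid 0 (· + 1)
      let in_degree := in_degree.modify supid 0 (· - 1)
      let next_lowest := if in_degree.getD supid 0 == 0 then PySem.Set.add next_lowest supid else next_lowest
      (in_degree, num_valentine, next_lowest)) (deg, nv, next)).1.keys = deg.keys) ∧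
    ((su.foldl (fun t supid =>
      let (in_degree, num_valentine, next_lowest) := t
      let num_valentine := num_valentine.modify supid 0 (· + 1)
      let in_degree := in_degree.modify supid 0 (· - 1)
      let next_lowest := if in_degree.getD supid 0 == 0 then PySem.Set.add next_lowest supid else next_lowest
      (in_degree, num_valentine, next_lowest)) (deg, nv, next)).2.1.keys = nv.keys) ∧
    (∀ n, (su.foldl (fun t supid =>
      let (in_degree, num_valentine, next_lowest) := t
      let num_valentine := num_valentine.modify supid 0 (· + 1)
      let in_degree := in_degree.modify supid 0 (· - 1)
      let next_lowest := if in_degree.getD supid 0 == 0 then PySem.Set.add next_lowest supid else next_lowest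
      (in_degree, num_valentine, next_lowest)) (deg, nv, next)).1.getD n 0
        = deg.getD n 0 - (su.count n : Int)) ∧
    (∀ n, (su.foldl (fun t supid =>
      let (in_degree, num_valentine, next_lowest) := t
      let num_valentine := num_valentine.modify supid 0 (· + 1)
      let in_degree := in_degree.modify supid 0 (· - 1)
      let next_lowest := if in_degree.getD supid 0 == 0 then PySem.Set.add next_lowest supid else next_lowest
      (in_degree, num_valentine, next_lowest)) (deg, nv, next)).2.1.getD n 0
        = nv.getD n 0 + (su.count n : Int)) ∧
    ((su.foldl (fun t supid =>
      let (in_degree, num_valentine, next_lowest) := t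
      let num_valentine := num_valentine.modify supid 0 (· + 1)
      let in_degree := in_degree.modify supid 0 (· - 1)
      let next_lowest := if in_degree.getD supid 0 == 0 then PySem.Set.add next_lowest supid else next_lowest
      (in_degree, num_valentine, next_lowest)) (deg, nv, next)).2.2.Nodup) ∧
    (∀ n, (n ∈ (su.foldl (fun t supid =>
      let (in_degree, num_valentine, next_lowest) := t
      let num_valentine := num_valentine.modify supid 0 (· + 1)
      let in_degree := in_degree.modify supid 0 (· - 1)
      let next_lowest := if in_degree.getD supid 0 == 0 then PySem.Set.add next_lowest supid else next_lowest
      (in_degree, num_valentine, next_lowest)) (deg, nv, next)).2.2)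
        ↔ (n ∈ next ∨ (1 ≤ deg.getD n 0 ∧ deg.getD n 0 ≤ (su.count n : Int)))) := by
  induction su with
  | nil =>
    intro deg nv next _ hnd
    refine ⟨rfl, rfl, by simp, by simp, hnd, ?_⟩
    intro n
    simp
    omega
  | cons s su ih =>
    intro deg nv next hin hnd
    simp only [List.foldl_cons]
    have hsdeg : s ∈ deg.keys := (hin s (by simp)).1
    have hsnv : s ∈ nv.keys := (hin s (by simp)).2
    set nv1 := nv.modify s 0 (· + 1) with hnv1
    set deg1 := deg.modify s 0 (· - 1) with hdeg1
    set next1 := if deg1.getD s 0 == 0 then PySem.Set.add next s else next with hnext1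
    have hknv1 : nv1.keys = nv.keys := by
      rw [hnv1, PySem.Dict.keys_modify,
          PySem.Dict.keys_insert_of_contains _ _ ((PySem.Dict.contains_iff_mem_keys _ _).mpr hsnv)]
    have hkdeg1 : deg1.keys = deg.keys := by
      rw [hdeg1, PySem.Dict.keys_modify,
          PySem.Dict.keys_insert_of_contains _ _ ((PySem.Dict.contains_iff_mem_keys _ _).mpr hsdeg)]
    have hgd1 : ∀ n, deg1.getD n 0 = if n = s then deg.getD s 0 - 1 else deg.getD n 0 := by
      intro n; rw [hdeg1, PySem.Dict.getD_modify]
    have hgn1 : ∀ n, nv1.getD n 0 = if n = s then nv.getD s 0 + 1 else nv.getD n 0 := by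
      intro n; rw [hnv1, PySem.Dict.getD_modify]
    have hnd1 : next1.Nodup := by
      rw [hnext1]; split
      · exact PySem.Set.nodup_add next s hnd
      · exact hnd
    have hmem1 : ∀ n, n ∈ next1 ↔ (n ∈ next ∨ (deg.getD s 0 = 1 ∧ n = s)) := by
      intro n
      rw [hnext1]
      by_cases hc : (deg1.getD s 0 == 0) = true
      · rw [if_pos hc, PySem.Set.mem_add]
        have h0 : deg1.getD s 0 = 0 := eq_of_beq hc
        have : deg.getD s 0 = 1 := by
          rw [hgd1 s, if_pos rfl] at h0
          omega
        simp [this]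
      · rw [if_neg hc]
        have : ¬ (deg.getD s 0 = 1) := by
          intro h1
          apply hc
          have hx := hgd1 s
          rw [if_pos rfl, h1] at hx
          simp [hx]
        simp [this]
    have hin1 : ∀ x ∈ su, x ∈ deg1.keys ∧ x ∈ nv1.keys := by
      intro x hx
      rw [hkdeg1, hknv1]
      exact hin x (by simp [hx])
    obtain ⟨k1, k2, f1, f2, nd, mm⟩ := ih deg1 nv1 next1 hin1 hnd1
    refine ⟨by rw [k1, hkdeg1], by rw [k2, hknv1], ?_, ?_, nd, ?_⟩
    · intro n
      rw [f1 n, hgd1 n, List.count_cons]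
      by_cases h : n = s
      · subst h; rw [if_pos rfl, if_pos (by simp)]; push_cast; ring
      · rw [if_neg h, if_neg (by simpa using fun hh : s = n => h hh.symm)]; push_cast; ring
    · intro n
      rw [f2 n, hgn1 n, List.count_cons]
      by_cases h : n = s
      · subst h; rw [if_pos rfl, if_pos (by simp)]; push_cast; ring
      · rw [if_neg h, if_neg (by simpa using fun hh : s = n => h hh.symm)]; push_cast; ring
    · intro n
      rw [mm n, hmem1 n, hgd1 n, List.count_cons]
      by_cases h : n = s
      · subst h
        by_cases hnx : n ∈ next <;> simp [hnx] <;> push_cast <;> omega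
      · have : (s == n) = false := by simpa using fun hh : s = n => h hh.symm
        rw [this]
        by_cases hnx : n ∈ next <;> simp [hnx, h] <;> push_cast <;> omega

-- ===== per-employee step characterization (A side) =====
lemma pvStepA_char (P : List (String × String)) (e : String)
    (deg nv : PySem.Dict String Int) (next : PySem.Set String)
    (hsu : ∀ s ∈ pvSups P e, s ∈ deg.keys ∧ s ∈ nv.keys) (hnd : next.Nodup) :
    ((ValentinesStep (pvDagA P) (deg, nv, next) e).1.keys = deg.keys) ∧
    ((ValentinesStep (pvDagA P) (deg, nv, next) e).2.1.keys = nv.keys) ∧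
    (∀ n, (ValentinesStep (pvDagA P) (deg, nv, next) e).1.getD n 0
        = deg.getD n 0 - ((pvSups P e).count n : Int)) ∧
    (∀ n, (ValentinesStep (pvDagA P) (deg, nv, next) e).2.1.getD n 0
        = nv.getD n 0 + ((pvSups P e).count n : Int) + pvTrans P nv e n) ∧
    ((ValentinesStep (pvDagA P) (deg, nv, next) e).2.2.Nodup) ∧
    (∀ n, n ∈ (ValentinesStep (pvDagA P) (deg, nv, next) e).2.2
        ↔ (n ∈ next ∨ (1 ≤ deg.getD n 0 ∧ deg.getD n 0 ≤ ((pvSups P e).count n : Int)))) := by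
  have hred : ValentinesStep (pvDagA P) (deg, nv, next) e
      = (if (pvDagA P).contains e = true then
          (((pvDagA P).getD e []).foldl (fun t supid =>
            let (in_degree, num_valentine, next_lowest) := t
            let num_valentine := num_valentine.modify supid 0 (· + 1)
            let in_degree := in_degree.modify supid 0 (· - 1)
            let next_lowest := if in_degree.getD supid 0 == 0 then PySem.Set.add next_lowest supid else next_lowest
            (in_degree, num_valentine, next_lowest))
            (deg, (if nv.contains e && (pvDagA P).contains e then
              nv.modify (PySem.List.pyGetD ((pvDagA P).getD e []) 0 "") 0 (· + nv.getD e 0)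
            else nv), next))
        else (deg, (if nv.contains e && (pvDagA P).contains e then
              nv.modify (PySem.List.pyGetD ((pvDagA P).getD e []) 0 "") 0 (· + nv.getD e 0)
            else nv), next)) := rfl
  by_cases hdag : (pvDagA P).contains e = true
  · have hne : pvSups P e ≠ [] := (pvDagA_contains P e).mp hdag
    have hfs : pvFs P e ∈ pvSups P e := by
      unfold pvFs
      rcases List.exists_cons_of_ne_nil hne with ⟨a, l, hal⟩
      rw [hal, PySem.List.pyGetD_zero_cons]
      simp
    set nv1 := (if nv.contains e && (pvDagA P).contains e then
        nv.modify (PySem.List.pyGetD ((pvDagA P).getD e []) 0 "") 0 (· + nv.getD e 0)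
      else nv) with hnv1
    have hknv1 : nv1.keys = nv.keys := by
      rw [hnv1]; split
      · rw [pvDagA_getD]
        show (nv.modify (pvFs P e) 0 _).keys = nv.keys
        rw [PySem.Dict.keys_modify,
            PySem.Dict.keys_insert_of_contains _ _
              ((PySem.Dict.contains_iff_mem_keys _ _).mpr (hsu _ hfs).2)]
      · rfl
    have hgnv1 : ∀ n, nv1.getD n 0 = nv.getD n 0 + pvTrans P nv e n := by
      intro n
      rw [hnv1]
      unfold pvTrans
      by_cases hg : (nv.contains e && !(pvSups P e).isEmpty) = true
      · have hce : nv.contains e = true := ((Bool.and_eq_true ..).mp hg).1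
        rw [if_pos (by rw [hce, hdag]; rfl), pvDagA_getD]
        show (nv.modify (pvFs P e) 0 (· + nv.getD e 0)).getD n 0 = _
        rw [PySem.Dict.getD_modify]
        by_cases hn : n = pvFs P e
        · rw [if_pos hn, if_pos ⟨hg, hn.symm⟩, hn]
        · rw [if_neg hn, if_neg]
          · ring
          · rintro ⟨_, hfsn⟩
            exact hn hfsn.symm
      · have hce : nv.contains e = false := by
          by_cases hc : nv.contains e = true
          · exfalso
            apply hg
            rw [hc, List.isEmpty_eq_false_iff.mpr hne]
            rfl
          · simpa using hc
        rw [if_neg (by rw [hce]; simp), if_neg]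
        · ring
        · rintro ⟨hg', _⟩
          simp [hce] at hg' 
    rw [hred, if_pos hdag, pvDagA_getD]
    have hsu1 : ∀ s ∈ pvSups P e, s ∈ deg.keys ∧ s ∈ nv1.keys := by
      intro s hs
      rw [hknv1]
      exact hsu s hs
    obtain ⟨k1, k2, f1, f2, nd, mm⟩ := pvInnerA_char (pvSups P e) deg nv1 next hsu1 hnd
    exact ⟨k1, by rw [k2, hknv1], f1,
      by intro n; rw [f2 n, hgnv1 n]; ring,
      nd, mm⟩
  · have hnil : pvSups P e = [] := by
      by_cases h : pvSups P e = []
      · exact h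
      · exact absurd ((pvDagA_contains P e).mpr h) (by simpa using hdag)
    have hdagf : (pvDagA P).contains e = false := by simpa using hdag
    rw [hred, if_neg hdag, if_neg (by rw [hdagf]; simp)]
    refine ⟨rfl, rfl, ?_, ?_, hnd, ?_⟩
    · intro n
      rw [hnil]
      simp
    · intro n
      rw [hnil]
      unfold pvTrans
      rw [if_neg]
      · simp
      · rw [hnil]
        rintro ⟨hg, _⟩
        simp at hg
    · intro n
      rw [hnil]
      simp
      omega

lemma pvT_nonneg (P : List (String × String)) (L : List String) (n : String) : 0 ≤ pvT P L n := by
  unfold pvT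
  apply List.sum_nonneg
  intro x hx
  rcases List.mem_map.mp hx with ⟨e, _, rfl⟩
  positivity

lemma pvFs_mem (P : List (String × String)) (e : String) (h : pvSups P e ≠ []) :
    pvFs P e ∈ pvSups P e := by
  unfold pvFs
  rcases List.exists_cons_of_ne_nil h with ⟨a, l, hal⟩
  rw [hal, PySem.List.pyGetD_zero_cons]
  simp

lemma contains_eq_of_keys_eq {ν : Type} (d d' : PySem.Dict String ν) (h : d.keys = d'.keys) (k : String) :
    d.contains k = d'.contains k := by
  have h1 := PySem.Dict.contains_iff_mem_keys d k
  have h2 := PySem.Dict.contains_iff_mem_keys d' k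
  rw [h] at h1
  exact Bool.eq_iff_iff.mpr (h1.trans h2.symm)

lemma pvTrans_congr (P : List (String × String)) (nv nv' : PySem.Dict String Int) (e n : String)
    (hk : nv'.keys = nv.keys) (hv : nv'.getD e 0 = nv.getD e 0) :
    pvTrans P nv' e n = pvTrans P nv e n := by
  unfold pvTrans
  rw [contains_eq_of_keys_eq nv' nv hk e, hv]

-- round characterization, A side
lemma pvRoundA_char (P : List (String × String)) (L : List String) :
    ∀ (deg nv : PySem.Dict String Int) (next : PySem.Set String),
    (∀ e ∈ L, ∀ s ∈ pvSups P e, s ∈ deg.keys ∧ s ∈ nv.keys ∧ s ∉ L) → next.Nodup →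
    ((L.foldl (ValentinesStep (pvDagA P)) (deg, nv, next)).1.keys = deg.keys) ∧
    ((L.foldl (ValentinesStep (pvDagA P)) (deg, nv, next)).2.1.keys = nv.keys) ∧
    (∀ n, (L.foldl (ValentinesStep (pvDagA P)) (deg, nv, next)).1.getD n 0
        = deg.getD n 0 - pvT P L n) ∧
    (∀ n, (L.foldl (ValentinesStep (pvDagA P)) (deg, nv, next)).2.1.getD n 0
        = nv.getD n 0 + pvT P L n + pvS P nv L n) ∧
    ((L.foldl (ValentinesStep (pvDagA P)) (deg, nv, next)).2.2.Nodup) ∧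
    (∀ n, n ∈ (L.foldl (ValentinesStep (pvDagA P)) (deg, nv, next)).2.2
        ↔ (n ∈ next ∨ (1 ≤ deg.getD n 0 ∧ deg.getD n 0 ≤ pvT P L n))) := by
  induction L with
  | nil =>
    intro deg nv next _ hnd
    refine ⟨rfl, rfl, by simp [pvT], by simp [pvT, pvS], hnd, ?_⟩
    intro n
    simp [pvT]
    omega
  | cons e L ih =>
    intro deg nv next hout hnd
    rw [List.foldl_cons]
    have hsu : ∀ s ∈ pvSups P e, s ∈ deg.keys ∧ s ∈ nv.keys := by
      intro s hs
      exact ⟨(hout e (by simp) s hs).1, (hout e (by simp) s hs).2.1⟩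
    obtain ⟨k1, k2, f1, f2, nd1, mm1⟩ := pvStepA_char P e deg nv next hsu hnd
    set st := ValentinesStep (pvDagA P) (deg, nv, next) e with hst
    have hout' : ∀ e' ∈ L, ∀ s ∈ pvSups P e', s ∈ st.1.keys ∧ s ∈ st.2.1.keys ∧ s ∉ L := by
      intro e' he' s hs
      have h := hout e' (by simp [he']) s hs
      exact ⟨by rw [k1]; exact h.1, by rw [k2]; exact h.2.1, fun hsl => h.2.2 (by simp [hsl])⟩
    obtain ⟨g1, g2, d1, d2, nd2, mm2⟩ := ih st.1 st.2.1 st.2.2 hout' nd1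
    have hstfold : L.foldl (ValentinesStep (pvDagA P)) st
        = L.foldl (ValentinesStep (pvDagA P)) (st.1, st.2.1, st.2.2) := rfl
    rw [hstfold]
    -- count of sups e at members of L is zero
    have hcnt0 : ∀ e', e' ∈ L → ((pvSups P e).count e' : Int) = 0 := by
      intro e' he'
      have : e' ∉ pvSups P e := by
        intro hmem
        exact (hout e (by simp) e' hmem).2.2 (by simp [he'])
      simp [List.count_eq_zero.mpr this]
    have htr0 : ∀ e', e' ∈ L → pvTrans P nv e e' = 0 := by
      intro e' he'
      unfold pvTrans
      rw [if_neg]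
      rintro ⟨hg, hfs⟩
      have hne : pvSups P e ≠ [] := by
        intro hnil
        rw [hnil] at hg
        simp at hg
      have := pvFs_mem P e hne
      rw [hfs] at this
      exact (hout e (by simp) e' this).2.2 (by simp [he'])
    refine ⟨by rw [g1, k1], by rw [g2, k2], ?_, ?_, nd2, ?_⟩
    · intro n
      rw [d1 n, f1 n]
      have : pvT P (e :: L) n = ((pvSups P e).count n : Int) + pvT P L n := by
        simp [pvT]
      rw [this]
      ring
    · intro n
      rw [d2 n, f2 n]
      have hS : pvS P st.2.1 L n = pvS P nv L n := by
        unfold pvS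
        congr 1
        apply List.map_congr_left
        intro e' he'
        apply pvTrans_congr
        · exact k2
        · rw [f2 e', hcnt0 e' he', htr0 e' he']
          ring
      rw [hS]
      have hT : pvT P (e :: L) n = ((pvSups P e).count n : Int) + pvT P L n := by simp [pvT]
      have hSc : pvS P nv (e :: L) n = pvTrans P nv e n + pvS P nv L n := by simp [pvS]
      rw [hT, hSc]
      ring
    · intro n
      rw [mm2 n]
      have hT : pvT P (e :: L) n = ((pvSups P e).count n : Int) + pvT P L n := by simp [pvT]
      rw [mm1 n, f1 n, hT]
      have hc0 : (0:Int) ≤ ((pvSups P e).count n : Int) := by positivity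
      have hT0 := pvT_nonneg P L n
      by_cases hnx : n ∈ next <;> simp [hnx] <;> omega

-- ===== B side: inner scan with flag false =====
lemma pvInnerB_char (n : String) (fl : List (String × String)) :
    ∀ (deg val : PySem.Dict String Int),
    (∀ p ∈ fl, p.2 ∈ deg.keys ∧ p.2 ∈ val.keys) →
    ((fl.foldl (fun (t : PySem.Dict String Int × PySem.Dict String Int × Bool) p =>
        let (deg, val, first) := t
        let val := if first && val.contains n then val.modify p.2 0 (· + val.getD n 0) else val
        let val := val.modify p.2 0 (· + 1)
        let deg := deg.modify p.2 0 (· - 1)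
        (deg, val, false)) (deg, val, false)).1.keys = deg.keys) ∧
    ((fl.foldl (fun (t : PySem.Dict String Int × PySem.Dict String Int × Bool) p =>
        let (deg, val, first) := t
        let val := if first && val.contains n then val.modify p.2 0 (· + val.getD n 0) else val
        let val := val.modify p.2 0 (· + 1)
        let deg := deg.modify p.2 0 (· - 1)
        (deg, val, false)) (deg, val, false)).2.1.keys = val.keys) ∧
    (∀ m, ((fl.foldl (fun (t : PySem.Dict String Int × PySem.Dict String Int × Bool) p =>
        let (deg, val, first) := t
        let val := if first && val.contains n then val.modify p.2 0 (· + val.getD n 0) else val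
        let val := val.modify p.2 0 (· + 1)
        let deg := deg.modify p.2 0 (· - 1)
        (deg, val, false)) (deg, val, false)).1.getD m 0)
        = deg.getD m 0 - ((fl.map Prod.snd).count m : Int)) ∧
    (∀ m, ((fl.foldl (fun (t : PySem.Dict String Int × PySem.Dict String Int × Bool) p =>
        let (deg, val, first) := t
        let val := if first && val.contains n then val.modify p.2 0 (· + val.getD n 0) else val
        let val := val.modify p.2 0 (· + 1)
        let deg := deg.modify p.2 0 (· - 1)
        (deg, val, false)) (deg, val, false)).2.1.getD m 0)
        = val.getD m 0 + ((fl.map Prod.snd).count m : Int)) := by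
  set g := (fun (t : PySem.Dict String Int × PySem.Dict String Int × Bool) (p : String × String) =>
        let (deg, val, first) := t
        let val := if first && val.contains n then val.modify p.2 0 (· + val.getD n 0) else val
        let val := val.modify p.2 0 (· + 1)
        let deg := deg.modify p.2 0 (· - 1)
        (deg, val, false)) with hg
  induction fl with
  | nil =>
    intro deg val _
    exact ⟨rfl, rfl, by simp, by simp⟩
  | cons p fl ih =>
    intro deg val hin
    rw [List.foldl_cons]
    have hpd : p.2 ∈ deg.keys := (hin p (by simp)).1
    have hpv : p.2 ∈ val.keys := (hin p (by simp)).2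
    have hconv : g (deg, val, false) p
        = (deg.modify p.2 0 (· - 1), val.modify p.2 0 (· + 1), false) := rfl
    rw [hconv]
    set val1 := val.modify p.2 0 (· + 1) with hval1
    set deg1 := deg.modify p.2 0 (· - 1) with hdeg1
    have hkv1 : val1.keys = val.keys := by
      rw [hval1, PySem.Dict.keys_modify,
          PySem.Dict.keys_insert_of_contains _ _ ((PySem.Dict.contains_iff_mem_keys _ _).mpr hpv)]
    have hkd1 : deg1.keys = deg.keys := by
      rw [hdeg1, PySem.Dict.keys_modify,
          PySem.Dict.keys_insert_of_contains _ _ ((PySem.Dict.contains_iff_mem_keys _ _).mpr hpd)]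
    have hin1 : ∀ q ∈ fl, q.2 ∈ deg1.keys ∧ q.2 ∈ val1.keys := by
      intro q hq
      rw [hkd1, hkv1]
      exact hin q (by simp [hq])
    obtain ⟨k1, k2, f1, f2⟩ := ih deg1 val1 hin1
    refine ⟨by rw [k1, hkd1], by rw [k2, hkv1], ?_, ?_⟩
    · intro m
      rw [f1 m, hdeg1, PySem.Dict.getD_modify, List.map_cons, List.count_cons]
      by_cases h : m = p.2
      · subst h; rw [if_pos rfl, if_pos (by simp)]; push_cast; ring
      · rw [if_neg h, if_neg (by simpa using fun hh : p.2 = m => h hh.symm)]; push_cast; ring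
    · intro m
      rw [f2 m, hval1, PySem.Dict.getD_modify, List.map_cons, List.count_cons]
      by_cases h : m = p.2
      · subst h; rw [if_pos rfl, if_pos (by simp)]; push_cast; ring
      · rw [if_neg h, if_neg (by simpa using fun hh : p.2 = m => h hh.symm)]; push_cast; ring

-- ===== B side: per-node step =====
lemma pvStepB_char (P : List (String × String)) (e : String)
    (deg val : PySem.Dict String Int)
    (hsu : ∀ s ∈ pvSups P e, s ∈ deg.keys ∧ s ∈ val.keys) :
    ((ValentinesAltInner P e (deg, val)).1.keys = deg.keys) ∧
    ((ValentinesAltInner P e (deg, val)).2.keys = val.keys) ∧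
    (∀ n, (ValentinesAltInner P e (deg, val)).1.getD n 0
        = deg.getD n 0 - ((pvSups P e).count n : Int)) ∧
    (∀ n, (ValentinesAltInner P e (deg, val)).2.getD n 0
        = val.getD n 0 + ((pvSups P e).count n : Int) + pvTrans P val e n) := by
  set g := (fun (t : PySem.Dict String Int × PySem.Dict String Int × Bool) (p : String × String) =>
        let (deg, val, first) := t
        let val := if first && val.contains e then val.modify p.2 0 (· + val.getD e 0) else val
        let val := val.modify p.2 0 (· + 1)
        let deg := deg.modify p.2 0 (· - 1)
        (deg, val, false)) with hg
  have hfold := PySem.List.foldl_if_eq_foldl_filter (fun (p : String × String) => p.1 == e)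
      g P (deg, val, true)
  have hred : ValentinesAltInner P e (deg, val)
      = (let r := (P.filter (fun p => p.1 == e)).foldl g (deg, val, true)
        (r.1, r.2.1)) :=
    congrArg (fun (r : PySem.Dict String Int × PySem.Dict String Int × Bool) => (r.1, r.2.1)) hfold
  rcases hfl : P.filter (fun p => p.1 == e) with _ | ⟨p0, rest⟩
  · have hsups : pvSups P e = [] := by unfold pvSups; rw [hfl]; rfl
    rw [hred, hfl]
    refine ⟨rfl, rfl, ?_, ?_⟩
    · intro n; rw [hsups]; simp
    · intro n
      rw [hsups]
      unfold pvTrans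
      rw [if_neg]
      · simp
      · rw [hsups]
        rintro ⟨hg, _⟩
        simp at hg
  · have hsups : pvSups P e = p0.2 :: rest.map Prod.snd := by
      unfold pvSups; rw [hfl]; rfl
    have hne : pvSups P e ≠ [] := by rw [hsups]; simp
    have hfs : pvFs P e = p0.2 := by
      unfold pvFs; rw [hsups, PySem.List.pyGetD_zero_cons]
    have hp0v : p0.2 ∈ val.keys := (hsu p0.2 (by rw [hsups]; simp)).2
    have hp0d : p0.2 ∈ deg.keys := (hsu p0.2 (by rw [hsups]; simp)).1
    rw [hred, hfl, List.foldl_cons]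
    set val1 := (if val.contains e = true then val.modify p0.2 0 (· + val.getD e 0) else val) with hval1
    have hconv : g (deg, val, true) p0
        = (deg.modify p0.2 0 (· - 1), val1.modify p0.2 0 (· + 1), false) := rfl
    rw [hconv]
    have hkv1 : val1.keys = val.keys := by
      rw [hval1]; split
      · rw [PySem.Dict.keys_modify,
            PySem.Dict.keys_insert_of_contains _ _ ((PySem.Dict.contains_iff_mem_keys _ _).mpr hp0v)]
      · rfl
    have hgv1 : ∀ n, val1.getD n 0 = val.getD n 0 + pvTrans P val e n := by
      intro n
      rw [hval1]
      unfold pvTrans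
      by_cases hc : val.contains e = true
      · rw [if_pos hc, PySem.Dict.getD_modify]
        by_cases hn : n = p0.2
        · rw [if_pos hn, if_pos ⟨by rw [hc, List.isEmpty_eq_false_iff.mpr hne]; rfl, by rw [hfs, hn]⟩, hn]
        · rw [if_neg hn, if_neg]
          · ring
          · rintro ⟨_, hfsn⟩
            rw [hfs] at hfsn
            exact hn hfsn.symm
      · rw [if_neg hc, if_neg]
        · ring
        · rintro ⟨hg, _⟩
          have := ((Bool.and_eq_true ..).mp hg).1
          exact hc this
    set val2 := val1.modify p0.2 0 (· + 1) with hval2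
    set deg1 := deg.modify p0.2 0 (· - 1) with hdeg1
    have hkv2 : val2.keys = val.keys := by
      rw [hval2, PySem.Dict.keys_modify,
          PySem.Dict.keys_insert_of_contains _ _
            ((PySem.Dict.contains_iff_mem_keys _ _).mpr (by rw [hkv1] at *; exact hkv1 ▸ hp0v))]
      exact hkv1
    have hkd1 : deg1.keys = deg.keys := by
      rw [hdeg1, PySem.Dict.keys_modify,
          PySem.Dict.keys_insert_of_contains _ _ ((PySem.Dict.contains_iff_mem_keys _ _).mpr hp0d)]
    have hin1 : ∀ q ∈ rest, q.2 ∈ deg1.keys ∧ q.2 ∈ val2.keys := by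
      intro q hq
      rw [hkd1, hkv2]
      have : q.2 ∈ pvSups P e := by
        rw [hsups]
        exact List.mem_cons_of_mem _ (List.mem_map_of_mem hq)
      exact ⟨(hsu q.2 this).1, (hsu q.2 this).2⟩
    obtain ⟨k1, k2, f1, f2⟩ := pvInnerB_char e rest deg1 val2 hin1
    refine ⟨by rw [k1, hkd1], by rw [k2, hkv2], ?_, ?_⟩
    · intro n
      rw [f1 n, hdeg1, PySem.Dict.getD_modify, hsups, List.count_cons]
      by_cases h : n = p0.2
      · subst h; rw [if_pos rfl, if_pos (by simp)]; push_cast; ring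
      · rw [if_neg h, if_neg (by simpa using fun hh : p0.2 = n => h hh.symm)]; push_cast; ring
    · intro n
      rw [f2 n, hval2, PySem.Dict.getD_modify, hgv1 n, hsups, List.count_cons]
      by_cases h : n = p0.2
      · subst h
        rw [if_pos rfl, if_pos (by simp), hgv1 p0.2]
        push_cast
        ring
      · rw [if_neg h, if_neg (by simpa using fun hh : p0.2 = n => h hh.symm)]
        push_cast
        ring

-- ===== round characterization, B side =====
lemma pvRoundB_char (P : List (String × String)) (L : List String) :
    ∀ (deg val : PySem.Dict String Int),
    (∀ e ∈ L, ∀ s ∈ pvSups P e, s ∈ deg.keys ∧ s ∈ val.keys ∧ s ∉ L) →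
    ((L.foldl (fun s n => ValentinesAltInner P n s) (deg, val)).1.keys = deg.keys) ∧
    ((L.foldl (fun s n => ValentinesAltInner P n s) (deg, val)).2.keys = val.keys) ∧
    (∀ n, (L.foldl (fun s n => ValentinesAltInner P n s) (deg, val)).1.getD n 0
        = deg.getD n 0 - pvT P L n) ∧
    (∀ n, (L.foldl (fun s n => ValentinesAltInner P n s) (deg, val)).2.getD n 0
        = val.getD n 0 + pvT P L n + pvS P val L n) := by
  induction L with
  | nil =>
    intro deg val _
    exact ⟨rfl, rfl, by simp [pvT], by simp [pvT, pvS]⟩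
  | cons e L ih =>
    intro deg val hout
    rw [List.foldl_cons]
    have hsu : ∀ s ∈ pvSups P e, s ∈ deg.keys ∧ s ∈ val.keys := by
      intro s hs
      exact ⟨(hout e (by simp) s hs).1, (hout e (by simp) s hs).2.1⟩
    obtain ⟨k1, k2, f1, f2⟩ := pvStepB_char P e deg val hsu
    set st := ValentinesAltInner P e (deg, val) with hst
    have hout' : ∀ e' ∈ L, ∀ s ∈ pvSups P e', s ∈ st.1.keys ∧ s ∈ st.2.keys ∧ s ∉ L := by
      intro e' he' s hs
      have h := hout e' (by simp [he']) s hs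
      exact ⟨by rw [k1]; exact h.1, by rw [k2]; exact h.2.1, fun hsl => h.2.2 (by simp [hsl])⟩
    obtain ⟨g1, g2, d1, d2⟩ := ih st.1 st.2 hout'
    have hstfold : L.foldl (fun s n => ValentinesAltInner P n s) st
        = L.foldl (fun s n => ValentinesAltInner P n s) (st.1, st.2) := rfl
    rw [hstfold]
    have hcnt0 : ∀ e', e' ∈ L → ((pvSups P e).count e' : Int) = 0 := by
      intro e' he'
      have : e' ∉ pvSups P e := by
        intro hmem
        exact (hout e (by simp) e' hmem).2.2 (by simp [he'])
      simp [List.count_eq_zero.mpr this]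
    have htr0 : ∀ e', e' ∈ L → pvTrans P val e e' = 0 := by
      intro e' he'
      unfold pvTrans
      rw [if_neg]
      rintro ⟨hg, hfs⟩
      have hne : pvSups P e ≠ [] := by
        intro hnil
        rw [hnil] at hg
        simp at hg
      have := pvFs_mem P e hne
      rw [hfs] at this
      exact (hout e (by simp) e' this).2.2 (by simp [he'])
    refine ⟨by rw [g1, k1], by rw [g2, k2], ?_, ?_⟩
    · intro n
      rw [d1 n, f1 n]
      have hT : pvT P (e :: L) n = ((pvSups P e).count n : Int) + pvT P L n := by simp [pvT]
      rw [hT]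
      ring
    · intro n
      rw [d2 n, f2 n]
      have hS : pvS P st.2 L n = pvS P val L n := by
        unfold pvS
        congr 1
        apply List.map_congr_left
        intro e' he'
        apply pvTrans_congr
        · exact k2
        · rw [f2 e', hcnt0 e' he', htr0 e' he']
          ring
      rw [hS]
      have hT : pvT P (e :: L) n = ((pvSups P e).count n : Int) + pvT P L n := by simp [pvT]
      have hSc : pvS P val (e :: L) n = pvTrans P val e n + pvS P val L n := by simp [pvS]
      rw [hT, hSc]
      ring

-- ===== counting bridges =====
lemma countP_cons_int (q : (String × String) → Bool) (p : String × String) (P : List (String × String)) :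
    ((List.countP q (p :: P) : Nat) : Int) = ((List.countP q P : Nat) : Int) + (if q p then 1 else 0) := by
  rw [List.countP_cons]
  by_cases h : q p <;> simp [h]

lemma countP_mem_cons_split (P : List (String × String)) (e : String) (L : List String)
    (he : e ∉ L) (n : String) :
    (P.countP (fun p => p.2 == n && decide (p.1 ∈ e :: L)) : Int)
      = (P.countP (fun p => p.2 == n && p.1 == e) : Int)
        + (P.countP (fun p => p.2 == n && decide (p.1 ∈ L)) : Int) := by
  induction P with
  | nil => simp
  | cons p P ihp =>
    rw [countP_cons_int, countP_cons_int, countP_cons_int, ihp]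
    have hx : (if (p.2 == n && decide (p.1 ∈ e :: L)) then (1:Int) else 0)
        = (if (p.2 == n && p.1 == e) then (1:Int) else 0)
          + (if (p.2 == n && decide (p.1 ∈ L)) then (1:Int) else 0) := by
      by_cases h1 : (p.2 == n) = true
      · by_cases h2 : p.1 = e
        · simp [h1, h2, he]
        · by_cases h3 : p.1 ∈ L <;> simp [h1, h2, h3, List.mem_cons]
      · simp [h1]
    rw [hx]
    ring

-- pvT over a nodup list L = number of pairs whose emp lies in L and sup = n
lemma pvT_eq_countP (P : List (String × String)) (L : List String) (hnd : L.Nodup) (n : String) :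
    pvT P L n = (P.countP (fun p => p.2 == n && decide (p.1 ∈ L)) : Int) := by
  induction L with
  | nil => simp [pvT]
  | cons e L ih =>
    have hnd' := (List.nodup_cons.mp hnd).2
    have he : e ∉ L := (List.nodup_cons.mp hnd).1
    have hT : pvT P (e :: L) n = ((pvSups P e).count n : Int) + pvT P L n := by simp [pvT]
    rw [hT, ih hnd']
    have hc : ((pvSups P e).count n : Int) = (P.countP (fun p => p.2 == n && p.1 == e) : Int) := by
      unfold pvSups
      rw [List.count_eq_countP, List.countP_map, List.countP_filter]
      congr 1
    rw [hc, countP_mem_cons_split P e L he n]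

lemma pvT_perm (P : List (String × String)) {L L' : List String} (h : L.Perm L') (n : String) :
    pvT P L n = pvT P L' n := List.Perm.sum_eq (h.map _)

lemma pvS_perm (P : List (String × String)) (nv : PySem.Dict String Int) {L L' : List String}
    (h : L.Perm L') (n : String) : pvS P nv L n = pvS P nv L' n := List.Perm.sum_eq (h.map _)

lemma countP_sub_split (P : List (String × String)) (q1 q2 q3 : (String × String) → Bool)
    (h : ∀ p ∈ P, (q3 p = (q1 p && !q2 p)) ∧ (q2 p = true → q1 p = true)) :
    (P.countP q3 : Int) = (P.countP q1 : Int) - (P.countP q2 : Int) := by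
  induction P with
  | nil => simp
  | cons p P ih =>
    rw [countP_cons_int, countP_cons_int, countP_cons_int,
        ih (fun q hq => h q (by simp [hq]))]
    obtain ⟨h3, h21⟩ := h p (by simp)
    rw [h3]
    by_cases h1 : q1 p = true <;> by_cases h2 : q2 p = true
    · simp [h1, h2]
      try omega
    · simp [h1, h2]
      try omega
    · exact absurd (h21 h2) h1
    · simp [h1, h2]
      try omega

lemma contains_update_eq (done : PySem.Set String) (zeros : List String) (x : String) :
    (PySem.Set.contains (PySem.Set.update done zeros) x) = (PySem.Set.contains done x || decide (x ∈ zeros)) := by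
  apply Bool.eq_iff_iff.mpr
  rw [Bool.or_eq_true]
  rw [PySem.Set.contains_iff, PySem.Set.mem_update, PySem.Set.contains_iff]
  simp

lemma pvLoop_eq (P : List (String × String)) :
    ∀ (fuel : Nat) (deg nv : PySem.Dict String Int) (low done : PySem.Set String),
    deg.keys = pvKD P → nv.keys = pvKV P →
    low.Nodup →
    (∀ n, n ∈ low ↔ (n ∈ pvKD P ∧ deg.getD n 0 = 0 ∧ n ∉ done)) →
    (∀ n, deg.getD n 0 = pvDegNow P done n) →
    (∀ n, n ∈ done → deg.getD n 0 = 0) →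
    ValentinesLoop (pvDagA P) fuel deg nv low = ValentinesAltLoop P fuel deg nv done := by
  intro fuel
  induction fuel with
  | zero => intro deg nv low done _ _ _ _ _ _; rfl
  | succ fuel ih =>
    intro deg nv low done hdk hnk hlnd hlow hdeg hdone0
    have hdegnn : ∀ n, 0 ≤ pvDegNow P done n := fun n => Int.natCast_nonneg _
    -- zeros as computed by B
    set zeros := deg.keys.filter (fun n => deg.getD n 0 == 0 && !(PySem.Set.contains done n)) with hzeros
    have hzl : ∀ x, x ∈ zeros ↔ x ∈ low := by
      intro x
      rw [hzeros, List.mem_filter, hlow x, hdk]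
      constructor
      · rintro ⟨h1, h2⟩
        rcases Bool.and_eq_true .. |>.mp h2 with ⟨h3, h4⟩
        refine ⟨h1, eq_of_beq h3, ?_⟩
        intro hm
        have hc := (PySem.Set.contains_iff done x).mpr hm
        simp [hc] at h4
        exact h4 hm
      · rintro ⟨h1, h2, h3⟩
        refine ⟨h1, ?_⟩
        rw [Bool.and_eq_true]
        refine ⟨by simp [h2], ?_⟩
        simp only [Bool.not_eq_true']
        rw [← Bool.not_eq_true]
        intro hc
        exact h3 ((PySem.Set.contains_iff done x).mp hc)
    have hznd : zeros.Nodup := List.Nodup.filter _ (hdk ▸ pvKD_nodup P)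
    have hperm : low.Perm zeros :=
      (List.perm_ext_iff_of_nodup hlnd hznd).mpr (fun a => (hzl a).symm)
    by_cases hle : low = []
    · have hze : zeros = [] := by
        rw [hle] at hperm
        exact hperm.symm.eq_nil
      show ValentinesLoop (pvDagA P) (fuel+1) deg nv low = ValentinesAltLoop P (fuel+1) deg nv done
      rw [hle]
      show (if PySem.Set.len ([] : PySem.Set String) > 0 then _ else nv) = _
      rw [if_neg (by simp [PySem.Set.len])]
      show nv = ValentinesAltLoop P (fuel+1) deg nv done
      simp only [ValentinesAltLoop]
      rw [← hzeros, hze]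
      simp
    · -- low nonempty: one round each side
      have hzne : zeros ≠ [] := by
        intro hze
        apply hle
        rw [hze] at hperm
        exact hperm.eq_nil
      have hout : ∀ e ∈ low, ∀ s ∈ pvSups P e, s ∈ deg.keys ∧ s ∈ nv.keys ∧ s ∉ low := by
        intro e he s hs
        obtain ⟨heKD, hedeg, hedone⟩ := (hlow e).mp he
        rcases List.mem_map.mp hs with ⟨p, hpf, hps⟩
        rcases List.mem_filter.mp hpf with ⟨hpP, hpe⟩
        have hpe' : p.1 = e := eq_of_beq hpe
        have hcf : PySem.Set.contains done p.1 = false := by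
          rw [← Bool.not_eq_true]
          intro hc
          exact hedone (hpe' ▸ (PySem.Set.contains_iff done p.1).mp hc)
        have hq : (fun (q : String × String) => q.2 == s && !(PySem.Set.contains done q.1)) p = true := by
          beta_reduce
          rw [hps, hcf]
          simp
        have hpos : 0 < P.countP (fun q => q.2 == s && !(PySem.Set.contains done q.1)) :=
          List.countP_pos_iff.mpr ⟨p, hpP, hq⟩
        have hds : 1 ≤ deg.getD s 0 := by
          rw [hdeg s]
          unfold pvDegNow
          exact_mod_cast hpos
        have hsKD : s ∈ pvKD P := by
          rw [pvKD, PySem.List.dedup_eq_ofList, PySem.Set.mem_ofList]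
          exact List.mem_flatMap.mpr ⟨p, hpP, by simp [hps]⟩
        have hsnotlow : s ∉ low := by
          intro hsl
          have := ((hlow s).mp hsl).2.1
          omega
        refine ⟨by rw [hdk]; exact hsKD, ?_, hsnotlow⟩
        rw [hnk]
        unfold pvKV
        refine List.mem_filter.mpr ⟨hsKD, ?_⟩
        simp only [decide_eq_true_eq]
        exact List.mem_map.mpr ⟨p, hpP, hps⟩
      have houtz : ∀ e ∈ zeros, ∀ s ∈ pvSups P e, s ∈ deg.keys ∧ s ∈ nv.keys ∧ s ∉ zeros := by
        intro e he s hs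
        have h := hout e ((hzl e).mp he) s hs
        exact ⟨h.1, h.2.1, fun hc => h.2.2 ((hzl s).mp hc)⟩
      obtain ⟨ak1, ak2, af1, af2, and1, amm⟩ :=
        pvRoundA_char P low deg nv PySem.Set.empty hout List.nodup_nil
      obtain ⟨bk1, bk2, bf1, bf2⟩ := pvRoundB_char P zeros deg nv houtz
      set rA := low.foldl (ValentinesStep (pvDagA P)) (deg, nv, PySem.Set.empty) with hrA
      set rB := zeros.foldl (fun s n => ValentinesAltInner P n s) (deg, nv) with hrB
      have hdegeq : rB.1 = rA.1 := by
        apply PySem.Dict.ext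
        rw [PySem.Dict.items_eq_map_keys _ (by rw [bk1, hdk]; exact pvKD_nodup P) 0,
            PySem.Dict.items_eq_map_keys _ (by rw [ak1, hdk]; exact pvKD_nodup P) 0, bk1, ak1]
        apply List.map_congr_left
        intro k _
        rw [bf1 k, af1 k, pvT_perm P hperm k]
      have hnveq : rB.2 = rA.2.1 := by
        apply PySem.Dict.ext
        rw [PySem.Dict.items_eq_map_keys _ (by rw [bk2, hnk]; exact pvKV_nodup P) 0,
            PySem.Dict.items_eq_map_keys _ (by rw [ak2, hnk]; exact pvKV_nodup P) 0, bk2, ak2]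
        apply List.map_congr_left
        intro k _
        rw [bf2 k, af2 k, pvT_perm P hperm k, pvS_perm P nv hperm k]
      -- the new done set
      set done' := PySem.Set.update done zeros with hdone'
      have hmemdone' : ∀ x, x ∈ done' ↔ (x ∈ done ∨ x ∈ zeros) := by
        intro x
        rw [hdone']
        exact PySem.Set.mem_update done zeros x
      -- new degree invariant
      have hdeg' : ∀ n, rA.1.getD n 0 = pvDegNow P done' n := by
        intro n
        rw [af1 n, hdeg n, pvT_eq_countP P low hlnd n]
        unfold pvDegNow
        rw [(countP_sub_split P
            (fun p => p.2 == n && !(PySem.Set.contains done p.1))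
            (fun p => p.2 == n && decide (p.1 ∈ low))
            (fun p => p.2 == n && !(PySem.Set.contains done' p.1)) ?_)]
        intro p _
        constructor
        · beta_reduce
          rw [hdone', contains_update_eq]
          have hdz : (decide (p.1 ∈ zeros) : Bool) = decide (p.1 ∈ low) := by
            simp [hzl p.1]
          rw [hdz]
          by_cases ha : (p.2 == n) = true <;>
            by_cases hb : PySem.Set.contains done p.1 = true <;>
              by_cases hc : p.1 ∈ low <;> simp [ha, hb, hc]
        · intro h2
          beta_reduce
          beta_reduce at h2
          rcases Bool.and_eq_true .. |>.mp h2 with ⟨ha, hc⟩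
          have hmem : p.1 ∈ low := by simpa using hc
          have : PySem.Set.contains done p.1 = false := by
            rw [← Bool.not_eq_true]
            intro hcc
            exact ((hlow p.1).mp hmem).2.2 ((PySem.Set.contains_iff done p.1).mp hcc)
          rw [ha, this]
          rfl
      have hdone0' : ∀ n, n ∈ done' → rA.1.getD n 0 = 0 := by
        intro n hn
        have h0 : deg.getD n 0 = 0 := by
          rcases (hmemdone' n).mp hn with h | h
          · exact hdone0 n h
          · exact ((hlow n).mp ((hzl n).mp h)).2.1
        have h1 := hdeg' n
        have h2 := af1 n
        have h3 := pvT_nonneg P low n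
        have h4 : 0 ≤ pvDegNow P done' n := Int.natCast_nonneg _
        omega
      have hlow' : ∀ n, n ∈ rA.2.2 ↔ (n ∈ pvKD P ∧ rA.1.getD n 0 = 0 ∧ n ∉ done') := by
        intro n
        rw [amm n]
        have hempty : (n ∈ (PySem.Set.empty : PySem.Set String)) ↔ False := by
          simp [PySem.Set.empty]
        constructor
        · rintro (h | ⟨h1, h2⟩)
          · exact absurd h (by simp [PySem.Set.empty])
          · have hT := pvT_eq_countP P low hlnd n
            have hpos : 0 < P.countP (fun p => p.2 == n && decide (p.1 ∈ low)) := by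
              have : (1:Int) ≤ (P.countP (fun p => p.2 == n && decide (p.1 ∈ low)) : Int) := by
                rw [← hT]
                omega
              exact_mod_cast this
            rcases List.countP_pos_iff.mp hpos with ⟨p, hpP, hq⟩
            rcases Bool.and_eq_true .. |>.mp hq with ⟨hqa, _⟩
            have hnKD : n ∈ pvKD P := by
              rw [pvKD, PySem.List.dedup_eq_ofList, PySem.Set.mem_ofList]
              exact List.mem_flatMap.mpr ⟨p, hpP, by simp [eq_of_beq hqa]⟩
            refine ⟨hnKD, ?_, ?_⟩
            · have ha := af1 n
              have hb := hdeg' n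
              have hc : 0 ≤ pvDegNow P done' n := Int.natCast_nonneg _
              omega
            · intro hmem
              rcases (hmemdone' n).mp hmem with h | h
              · have := hdone0 n h
                omega
              · have := ((hlow n).mp ((hzl n).mp h)).2.1
                omega
        · rintro ⟨h1, h2, h3⟩
          right
          have hnd : n ∉ done := fun h => h3 ((hmemdone' n).mpr (Or.inl h))
          have hnz : n ∉ zeros := fun h => h3 ((hmemdone' n).mpr (Or.inr h))
          have hne0 : deg.getD n 0 ≠ 0 := by
            intro h0
            apply hnz
            rw [hzeros]
            refine List.mem_filter.mpr ⟨by rw [hdk]; exact h1, ?_⟩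
            rw [Bool.and_eq_true]
            refine ⟨by simp [h0], ?_⟩
            simp only [Bool.not_eq_true']
            rw [← Bool.not_eq_true]
            intro hc
            exact hnd ((PySem.Set.contains_iff done n).mp hc)
          have hge : 0 ≤ deg.getD n 0 := by
            rw [hdeg n]
            exact Int.natCast_nonneg _
          have ha := af1 n
          omega
      -- unfold one loop step on each side and recurse
      show ValentinesLoop (pvDagA P) (fuel+1) deg nv low = ValentinesAltLoop P (fuel+1) deg nv done
      have hA : ValentinesLoop (pvDagA P) (fuel+1) deg nv low
          = ValentinesLoop (pvDagA P) fuel rA.1 rA.2.1 rA.2.2 := by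
        show (if PySem.Set.len low > 0 then
            ValentinesLoop (pvDagA P) fuel rA.1 rA.2.1 rA.2.2 else nv) = _
        rw [if_pos]
        show (0:Int) < PySem.Set.len low
        have : 0 < low.length := List.length_pos_of_ne_nil hle
        simp [PySem.Set.len]
        omega
      have hB : ValentinesAltLoop P (fuel+1) deg nv done
          = ValentinesAltLoop P fuel rB.1 rB.2 done' := by
        show (let zs := deg.keys.filter (fun n => deg.getD n 0 == 0 && !(PySem.Set.contains done n))
          if zs.isEmpty then nv
          else
            let d := PySem.Set.update done zs
            let r := zs.foldl (fun s n => ValentinesAltInner P n s) (deg, nv)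
            ValentinesAltLoop P fuel r.1 r.2 d) = _
        rw [← hzeros]
        show (if zeros.isEmpty then nv else ValentinesAltLoop P fuel rB.1 rB.2 done') = _
        rw [if_neg (by simpa using hzne)]
      rw [hA, hB, hdegeq, hnveq]
      exact ih rA.1 rA.2.1 rA.2.2 done' (by rw [ak1, hdk]) (by rw [ak2, hnk]) and1 hlow' hdeg' hdone0'

-- ===== assembling the ports =====
lemma convA1 (hr : List String) : ∀ (d : PySem.Dict String Int),
    hr.foldl (fun d rec =>
      (d.insert (PySem.Str.slice rec (some 6) none) 0).insert (PySem.Str.slice rec none (some 6)) 0) d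
    = (pvPairs hr).foldl (fun d p => (d.insert p.1 0).insert p.2 0) d := by
  induction hr with
  | nil => intro d; rfl
  | cons r hr ih =>
    intro d
    simp only [pvPairs, List.map_cons, List.foldl_cons]
    exact ih _

lemma convA2 (hr : List String) :
    ∀ (s : PySem.Dict String (List String) × PySem.Dict String Int),
    hr.foldl (fun (s : PySem.Dict String (List String) × PySem.Dict String Int) rec =>
      ((if s.1.contains (PySem.Str.slice rec (some 6) none) then
          s.1.insert (PySem.Str.slice rec (some 6) none)
            (s.1.getD (PySem.Str.slice rec (some 6) none) [] ++ [PySem.Str.slice rec none (some 6)])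
        else s.1.insert (PySem.Str.slice rec (some 6) none) [PySem.Str.slice rec none (some 6)]),
       s.2.modify (PySem.Str.slice rec none (some 6)) 0 (· + 1))) s
    = ((pvPairs hr).foldl (fun d p => if d.contains p.1 then d.insert p.1 (d.getD p.1 [] ++ [p.2])
          else d.insert p.1 [p.2]) s.1,
       (pvPairs hr).foldl (fun d p => d.modify p.2 0 (· + 1)) s.2) := by
  induction hr with
  | nil => intro s; rfl
  | cons r hr ih =>
    intro s
    simp only [pvPairs, List.map_cons, List.foldl_cons]
    rw [← pvPairs]
    exact ih _

lemma ValentinesA_eq (hr : List String) :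
    Valentines hr = PySem.List.sorted
      ((ValentinesLoop (pvDagA (pvPairs hr)) (2 * hr.length + 2) (pvDegA (pvPairs hr))
          (pvInitA (pvPairs hr)).2 (pvInitA (pvPairs hr)).1).items)
      (fun p => -p.2) false := by
  unfold Valentines
  dsimp only
  rw [convA1 hr PySem.Dict.empty, convA2 hr]
  rfl

lemma ValentinesAlt_eq (hr : List String) :
    Valentines_alt hr = PySem.List.sorted
      ((ValentinesAltLoop (pvPairs hr) (2 * hr.length + 2) (pvDegB (pvPairs hr))
          (pvVal0 (pvPairs hr)) PySem.Set.empty).items)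
      (fun p => -p.2) false := rfl

lemma contains_empty_set (x : String) : PySem.Set.contains (PySem.Set.empty : PySem.Set String) x = false := by
  rw [← Bool.not_eq_true]
  intro h
  have := (PySem.Set.contains_iff _ x).mp h
  simp [PySem.Set.empty] at this

theorem Valentines_main (hr : List String) : Valentines hr = Valentines_alt hr := by
  rw [ValentinesA_eq, ValentinesAlt_eq]
  set P := pvPairs hr with hP
  rw [← pvDegAB, ← pvNV0_eq_pvVal0]
  congr 1
  apply congrArg
  apply pvLoop_eq P (2 * hr.length + 2) (pvDegA P) (pvInitA P).2 (pvInitA P).1 PySem.Set.empty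
      (pvDegA_keys P) (by rw [pvNV0_eq_pvVal0, pvVal0_keys])
  · rw [pvLow0_char]
    exact List.Nodup.filter _ (pvKD_nodup P)
  · intro n
    rw [pvLow0_char, List.mem_filter]
    constructor
    · rintro ⟨h1, h2⟩
      exact ⟨h1, eq_of_beq h2, by simp [PySem.Set.empty]⟩
    · rintro ⟨h1, h2, _⟩
      exact ⟨h1, by simp [h2]⟩
  · intro n
    rw [pvDegA_getD]
    unfold pvDegNow
    congr 1
    rw [List.count_eq_countP, List.countP_map]
    apply List.countP_congr
    intro p _
    rw [contains_empty_set p.1]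
    simp [Function.comp]
  · intro n hn
    simp [PySem.Set.empty] at hn


-- ===== VERDICT (by name: the statement is the Claim_ definition above) =====
theorem Valentines_spec : Claim_equal_Valentines := by
  intro hr_record _
  show Valentines hr_record = Valentines_alt hr_record
  exact Valentines_main hr_record
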